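-- pv_equiv track=rewrite | github.com/itsarvindhere/binary-search | 019. Compare Strings by Frequency of the Smallest Character/BinarySearch.py | f
-- ===== SOURCE A (Python) =====
-- def f(s):
--
--     freq = 0
--     smallest = s[0]
--
--     # In same loop, not just update the count but also keep track of smallest character
--     for c in s:
--         # If we get a smaller character, update smallest and reset freq to 1
--         if ord(c) < ord(smallest):
--             smallest = c
--             freq = 1
--
--         # If we get the same character as smallest, increment frequency
--         elif ord(c) == ord(smallest): freq += 1
--
--         # If we get a character bigger than smallest, skip
--         else: continue
--
--
--     # Return the frequency of smallest character
--     return freq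
-- ===== SOURCE B (Python) =====
-- def f(s):
--     # two separate scans: find the minimum character, then count it
--     return s.count(min(s))
-- ===== Notes on version B (the rewrite author's own statement) =====
-- stated objective: idiomatic
-- what changed: Replaces A's single fused loop that tracks the running smallest character and resets a counter with two separate builtin scans: m = min(s) then s.count(m).
import Mathlib
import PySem

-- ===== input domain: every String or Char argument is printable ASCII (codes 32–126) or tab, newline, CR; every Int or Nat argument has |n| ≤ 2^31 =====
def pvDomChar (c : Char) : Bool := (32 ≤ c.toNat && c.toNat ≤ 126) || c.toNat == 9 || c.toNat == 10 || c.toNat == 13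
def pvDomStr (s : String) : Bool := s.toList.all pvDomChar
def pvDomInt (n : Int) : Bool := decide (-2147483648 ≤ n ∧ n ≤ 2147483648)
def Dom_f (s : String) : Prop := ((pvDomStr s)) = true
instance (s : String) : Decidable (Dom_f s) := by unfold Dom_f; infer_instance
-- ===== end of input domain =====

-- B replaces A's fused min-tracking/counter-resetting loop by two builtin scans: count(min(s)); idiomatic, same O(n).

-- ===== PORT A =====
-- one pass; state = (freq, smallest), comparisons via ord (= Char.toNat)
def f (s : String) : Int :=
  match s.toList with
  | [] => 0  -- unreachable under Pre_f: Python's s[0] raises IndexError here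
  | c0 :: _ =>
    (s.toList.foldl (fun (st : Int × Char) c =>
      if c.toNat < st.2.toNat then (1, c)
      else if c.toNat = st.2.toNat then (st.1 + 1, st.2)
      else st) (0, c0)).1

-- ===== PORT B =====
-- m = min(s); return s.count(m)
def f_alt (s : String) : Int :=
  match PySem.List.min? s.toList (fun c => c) with
  | some m => (s.toList.count m : Int)
  | none => 0  -- unreachable under Pre_f: Python's min('') raises ValueError

-- ===== PRECONDITION & SPEC =====
-- Pre_f excludes only the empty string, on which A raises IndexError (and B raises ValueError).
def Pre_f (s : String) : Prop := s.toList ≠ []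
instance (s : String) : Decidable (Pre_f s) := by unfold Pre_f; infer_instance
def pvWitness_f : String := ("ab")
def Spec_f (s : String) (out : Int) : Prop := out = f_alt s
instance (s : String) (out : Int) : Decidable (Spec_f s out) := by unfold Spec_f; infer_instance

-- ===== CLAIM (what is proved, stated in full; the proofs are below) =====
def Claim_equal_f : Prop := ∀ (s : String), Dom_f s → Pre_f s → Spec_f s (f s)

-- ===== LEMMAS AND PROOFS =====

theorem char_lt_iff (a b : Char) : a < b ↔ a.toNat < b.toNat :=
  Char.lt_def.trans UInt32.lt_iff_toNat_lt

theorem char_eq_iff (a b : Char) : a = b ↔ a.toNat = b.toNat := by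
  constructor
  · rintro rfl; rfl
  · intro h; exact Char.ext (UInt32.toNat_inj.mp h)

theorem foldl_min_le (t : List Char) (x : Char) : t.foldl min x ≤ x := by
  induction t generalizing x with
  | nil => exact le_refl x
  | cons c t ih => exact le_trans (ih (min x c)) (min_le_left x c)

-- A's loop body
def stepA (st : Int × Char) (c : Char) : Int × Char :=
  if c.toNat < st.2.toNat then (1, c)
  else if c.toNat = st.2.toNat then (st.1 + 1, st.2)
  else st

theorem count_cons_ne (t : List Char) (a c : Char) (h : a ≠ c) :
    (c :: t).count a = t.count a := by
  rw [List.count_cons]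
  simp [Ne.symm h]

theorem count_cons_self (t : List Char) (c : Char) :
    ((c :: t).count c : Int) = (t.count c : Int) + 1 := by
  rw [List.count_cons]
  simp

theorem loop_char (t : List Char) (k : Int) (m : Char) :
    t.foldl stepA (k, m) =
      (if t.foldl min m < m then (t.count (t.foldl min m) : Int)
       else k + (t.count m : Int), t.foldl min m) := by
  induction t generalizing k m with
  | nil => simp
  | cons c t ih =>
    by_cases hlt : c.toNat < m.toNat
    · have hcm : c < m := (char_lt_iff c m).mpr hlt
      have hmin : min m c = c := min_eq_right (le_of_lt hcm)
      simp only [List.foldl_cons, stepA, if_pos hlt, hmin, ih]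
      have hle : t.foldl min c ≤ c := foldl_min_le t c
      have h1 : t.foldl min c < m := lt_of_le_of_lt hle hcm
      rw [if_pos h1]
      simp only [Prod.mk.injEq]
      refine ⟨?_, trivial⟩
      rcases lt_or_eq_of_le hle with h | h
      · rw [if_pos h, count_cons_ne t _ c (ne_of_lt h)]
      · rw [h, if_neg (lt_irrefl c), count_cons_self]
        omega
    · by_cases heq : c.toNat = m.toNat
      · have hcm : c = m := (char_eq_iff c m).mpr heq
        subst hcm
        simp only [List.foldl_cons, stepA, if_neg hlt, if_true, min_self, ih]
        simp only [Prod.mk.injEq]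
        refine ⟨?_, trivial⟩
        by_cases h1 : t.foldl min c < c
        · rw [if_pos h1, if_pos h1, count_cons_ne t _ c (ne_of_lt h1)]
        · rw [if_neg h1, if_neg h1, count_cons_self]
          omega
      · have hcm : m < c := by
          rcases lt_trichotomy c.toNat m.toNat with h | h | h
          · exact absurd h hlt
          · exact absurd h heq
          · exact (char_lt_iff m c).mpr h
        have hmin : min m c = m := min_eq_left (le_of_lt hcm)
        simp only [List.foldl_cons, stepA, if_neg hlt, if_neg heq, hmin, ih]
        simp only [Prod.mk.injEq]
        refine ⟨?_, trivial⟩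
        by_cases h1 : t.foldl min m < m
        · rw [if_pos h1, if_pos h1,
            count_cons_ne t _ c (ne_of_lt (lt_trans h1 hcm))]
        · rw [if_neg h1, if_neg h1, count_cons_ne t m c (ne_of_lt hcm)]

-- ===== VERDICT (by name: the statement is the Claim_ definition above) =====
theorem f_spec : Claim_equal_f := by
  intro s _ hpre
  unfold Spec_f f f_alt
  cases hcs : s.toList with
  | nil => exact absurd hcs hpre
  | cons c0 t =>
    have h0 : (c0 :: t).foldl stepA (0, c0) = t.foldl stepA (1, c0) := by
      simp [stepA]
    show ((c0 :: t).foldl (fun (st : Int × Char) c =>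
        if c.toNat < st.2.toNat then (1, c)
        else if c.toNat = st.2.toNat then (st.1 + 1, st.2)
        else st) (0, c0)).1 = _
    rw [show (fun (st : Int × Char) c =>
        if c.toNat < st.2.toNat then (1, c)
        else if c.toNat = st.2.toNat then (st.1 + 1, st.2)
        else st) = stepA from rfl, h0, loop_char,
      PySem.List.min?_id_cons]
    dsimp only
    have hle : t.foldl min c0 ≤ c0 := foldl_min_le t c0
    rcases lt_or_eq_of_le hle with h | h
    · rw [if_pos h, count_cons_ne t _ c0 (ne_of_lt h)]
    · rw [h, if_neg (lt_irrefl c0), count_cons_self]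
      omega
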